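-- pv_equiv track=rewrite | github.com/Hacktomm/dds-explorary-encoder | utils/functions/converts.py | trits_to_dna
-- ===== SOURCE A (Python) =====
-- from typing import List, Optional
--
-- GOLDMAN_ENCODE = {
--     'A': {0: 'C', 1: 'G', 2: 'T'},
--     'C': {0: 'G', 1: 'T', 2: 'A'},
--     'G': {0: 'T', 1: 'A', 2: 'C'},
--     'T': {0: 'A', 1: 'C', 2: 'G'},
-- }
--
-- def trits_to_dna(trits: List[int], start: str = 'A') -> str:
--     last = start
--     dna = []
--     for t in trits:
--         nxt = GOLDMAN_ENCODE[last][t]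
--         dna.append(nxt)
--         last = nxt
--     return ''.join(dna)
-- ===== SOURCE B (Python) =====
-- ORDER = 'ACGT'
-- IDX = {'A': 0, 'C': 1, 'G': 2, 'T': 3}
-- DELTA = {0: 1, 1: 2, 2: 3}
--
-- def _offsets(trits):
--     # Divide and conquer: returns (cumulative rotation offsets of the segment
--     # relative to its own start, total rotation of the segment). The two halves
--     # are encoded independently; the right half's offsets are shifted by the
--     # left half's total rotation when merging.
--     if len(trits) == 1:
--         d = DELTA[trits[0]]
--         return [d], d
--     m = len(trits) // 2
--     L, sL = _offsets(trits[:m])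
--     R, sR = _offsets(trits[m:])
--     return L + [r + sL for r in R], sL + sR
--
-- def trits_to_dna(trits, start='A'):
--     if not trits:
--         return ''
--     i0 = IDX[start]
--     offs, _ = _offsets(trits)
--     return ''.join(ORDER[(i0 + o) % 4] for o in offs)
-- ===== Notes on version B (the rewrite author's own statement) =====
-- stated objective: alternative
-- what changed: Replaces A's sequential table-driven state machine (nested Goldman dict, running 'last' nucleotide) by a divide-and-conquer: each half is encoded independently into cumulative rotation offsets, the right half's offsets are shifted by the left half's total rotation on merge, and the offsets are translated to 'ACGT' letters at the end; this works because the Goldman table is the rotation next = (cur + t + 1) mod 4.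
import Mathlib
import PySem

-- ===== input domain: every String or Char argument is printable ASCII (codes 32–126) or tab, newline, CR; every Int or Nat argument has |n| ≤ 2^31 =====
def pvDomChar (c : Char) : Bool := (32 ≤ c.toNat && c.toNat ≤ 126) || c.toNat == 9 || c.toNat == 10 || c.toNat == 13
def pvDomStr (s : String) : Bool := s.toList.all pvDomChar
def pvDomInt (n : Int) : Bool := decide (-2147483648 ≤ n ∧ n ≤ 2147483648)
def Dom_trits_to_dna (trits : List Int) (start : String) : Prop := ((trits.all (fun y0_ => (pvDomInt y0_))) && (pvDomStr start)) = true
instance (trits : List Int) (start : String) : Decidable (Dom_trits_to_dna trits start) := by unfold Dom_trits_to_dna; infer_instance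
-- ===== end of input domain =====

-- B replaces A's sequential Goldman-table state machine by divide-and-conquer over the trit
-- list: each half yields its cumulative rotation offsets, the right half is shifted by the
-- left half's total rotation on merge (objective: alternative; same result, O(n log n)).

-- ===== PORT A =====
def pvGoldman : PySem.Dict String (PySem.Dict Int String) :=
  PySem.Dict.ofList
    [ ("A", PySem.Dict.ofList [(0, "C"), (1, "G"), (2, "T")])
    , ("C", PySem.Dict.ofList [(0, "G"), (1, "T"), (2, "A")])
    , ("G", PySem.Dict.ofList [(0, "T"), (1, "A"), (2, "C")])
    , ("T", PySem.Dict.ofList [(0, "A"), (1, "C"), (2, "G")]) ]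

-- the for-loop: state (last, dna); bad lookups default to "" (excluded by Pre_, where Python raises KeyError)
def pvALoop : List Int → String → List String → String × List String
  | [], last, dna => (last, dna)
  | t :: ts, last, dna =>
    let nxt := (pvGoldman.getD last PySem.Dict.empty).getD t ""
    pvALoop ts nxt (dna ++ [nxt])

def trits_to_dna (trits : List Int) (start : String) : String :=
  PySem.Str.join "" (pvALoop trits start []).2

-- ===== PORT B =====
def pvOrder : String := "ACGT"
def pvIdx : PySem.Dict String Int :=
  PySem.Dict.ofList [("A", 0), ("C", 1), ("G", 2), ("T", 3)]
def pvDelta : PySem.Dict Int Int :=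
  PySem.Dict.ofList [(0, 1), (1, 2), (2, 3)]

-- _offsets of Source B: divide and conquer on the list (nonempty by the callers' guard;
-- the [] case returns ([], 0) and is never reached, Source B never calls _offsets on [])
def pvOffsets (trits : List Int) : List Int × Int :=
  match trits with
  | [] => ([], 0)
  | [t] => ([pvDelta.getD t 0], pvDelta.getD t 0)
  | t1 :: t2 :: rest =>
    let m := (t1 :: t2 :: rest).length / 2
    let L := pvOffsets ((t1 :: t2 :: rest).take m)
    let R := pvOffsets ((t1 :: t2 :: rest).drop m)
    (L.1 ++ R.1.map (· + L.2), L.2 + R.2)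
  termination_by trits.length
  decreasing_by all_goals (simp; omega)

-- ORDER[i % 4] as a 1-character string (in range for every i since 0 ≤ i % 4 < 4)
def pvNuc (i : Int) : String :=
  match PySem.Str.pyGet? pvOrder (PySem.Int.mod i 4) with
  | some c => String.ofList [c]
  | none => ""

def trits_to_dna_alt (trits : List Int) (start : String) : String :=
  if trits = [] then ""
  else
    let i0 := pvIdx.getD start 0
    PySem.Str.join "" ((pvOffsets trits).1.map (fun o => pvNuc (i0 + o)))

-- ===== PRECONDITION & SPEC =====
-- Pre_ excludes exactly the inputs where A raises KeyError: a nonempty trit list with a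
-- start outside 'ACGT' or containing a trit outside {0,1,2}.
def Pre_trits_to_dna (trits : List Int) (start : String) : Prop :=
  trits = [] ∨
    ((start = "A" ∨ start = "C" ∨ start = "G" ∨ start = "T") ∧
     ∀ t ∈ trits, t = 0 ∨ t = 1 ∨ t = 2)
instance (trits : List Int) (start : String) : Decidable (Pre_trits_to_dna trits start) := by
  unfold Pre_trits_to_dna; infer_instance

def pvWitness_trits_to_dna : List Int × String := ([0, 2, 1, 1, 0], "A")

def Spec_trits_to_dna (trits : List Int) (start : String) (out : String) : Prop := out = trits_to_dna_alt trits start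
instance (trits : List Int) (start : String) (out : String) : Decidable (Spec_trits_to_dna trits start out) := by unfold Spec_trits_to_dna; infer_instance

-- ===== CLAIM (what is proved, stated in full; the proofs are below) =====
def Claim_equal_trits_to_dna : Prop := ∀ (trits : List Int) (start : String), Dom_trits_to_dna trits start → Pre_trits_to_dna trits start → Spec_trits_to_dna trits start (trits_to_dna trits start)

-- ===== LEMMAS AND PROOFS =====

-- Proof-side reference loop: the running totals of deltas starting from `total`.
def pvBLoop : List Int → Int → List Int → List Int
  | [], _, totals => totals
  | t :: ts, total, totals =>
    let total' := total + pvDelta.getD t 0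
    pvBLoop ts total' (totals ++ [total'])

def pvSum (ts : List Int) : Int := (ts.map (fun t => pvDelta.getD t 0)).sum

-- A's loop only appends: pull the accumulator out
theorem pvALoop_acc (ts : List Int) (last : String) (dna : List String) :
    (pvALoop ts last dna).2 = dna ++ (pvALoop ts last []).2 := by
  induction ts generalizing last dna with
  | nil => simp [pvALoop]
  | cons t ts ih =>
    simp only [pvALoop, List.nil_append]
    rw [ih ((pvGoldman.getD last PySem.Dict.empty).getD t "") (dna ++ [(pvGoldman.getD last PySem.Dict.empty).getD t ""]),
      ih ((pvGoldman.getD last PySem.Dict.empty).getD t "") [(pvGoldman.getD last PySem.Dict.empty).getD t ""]]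
    simp

-- pvBLoop only appends: pull the accumulator out
theorem pvBLoop_acc (ts : List Int) (total : Int) (totals : List Int) :
    pvBLoop ts total totals = totals ++ pvBLoop ts total [] := by
  induction ts generalizing total totals with
  | nil => simp [pvBLoop]
  | cons t ts ih =>
    simp only [pvBLoop, List.nil_append]
    rw [ih (total + pvDelta.getD t 0) (totals ++ [total + pvDelta.getD t 0]),
      ih (total + pvDelta.getD t 0) [total + pvDelta.getD t 0]]
    simp

-- shifting the start shifts all totals
theorem pvBLoop_shift (ts : List Int) (a b : Int) :
    pvBLoop ts (a + b) [] = (pvBLoop ts b []).map (· + a) := by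
  induction ts generalizing b with
  | nil => simp [pvBLoop]
  | cons t ts ih =>
    simp only [pvBLoop, List.nil_append]
    rw [pvBLoop_acc ts (a + b + pvDelta.getD t 0), pvBLoop_acc ts (b + pvDelta.getD t 0)]
    have : a + b + pvDelta.getD t 0 = a + (b + pvDelta.getD t 0) := by ring
    rw [this, ih (b + pvDelta.getD t 0)]
    simp [add_comm]

-- splitting the list splits the loop
theorem pvBLoop_append (xs ys : List Int) (t : Int) (acc : List Int) :
    pvBLoop (xs ++ ys) t acc = pvBLoop ys (t + pvSum xs) (pvBLoop xs t acc) := by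
  induction xs generalizing t acc with
  | nil => simp [pvBLoop, pvSum]
  | cons x xs ih =>
    simp only [List.cons_append, pvBLoop]
    rw [ih]
    have : t + pvSum (x :: xs) = t + pvDelta.getD x 0 + pvSum xs := by
      simp [pvSum]; ring
    rw [this]

-- the divide-and-conquer offsets are exactly the running totals from 0
theorem pvOffsets_eq (ts : List Int) :
    pvOffsets ts = (pvBLoop ts 0 [], pvSum ts) := by
  induction ts using pvOffsets.induct with
  | case1 => simp [pvOffsets, pvBLoop, pvSum]
  | case2 t => simp [pvOffsets, pvBLoop, pvSum]
  | case3 t1 t2 rest m ihL ihR =>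
    have hm : m = (t1 :: t2 :: rest).length / 2 := rfl
    rw [pvOffsets]
    simp only [← hm, ihL, ihR]
    set ts := t1 :: t2 :: rest with hts
    have hsplit : ts.take m ++ ts.drop m = ts := List.take_append_drop m ts
    have h1 : pvBLoop (ts.take m) 0 [] ++ (pvBLoop (ts.drop m) 0 []).map (· + pvSum (ts.take m)) = pvBLoop ts 0 [] := by
      conv_rhs => rw [← hsplit]
      rw [pvBLoop_append, zero_add, ← pvBLoop_shift,
        show pvSum (ts.take m) + 0 = pvSum (ts.take m) by ring,
        pvBLoop_acc (ts.drop m) (pvSum (ts.take m)) (pvBLoop (ts.take m) 0 [])]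
    have h2 : pvSum (ts.take m) + pvSum (ts.drop m) = pvSum ts := by
      conv_rhs => rw [← hsplit]
      simp [pvSum]
    simp only [h1, h2]

-- pvNuc only depends on the index mod 4
theorem pvNuc_mod (s : Int) : pvNuc s = pvNuc (s % 4) := by
  unfold pvNuc
  rw [PySem.Int.mod_eq_emod_of_pos (by norm_num), PySem.Int.mod_eq_emod_of_pos (by norm_num),
    Int.emod_emod_of_dvd s dvd_rfl]

-- the Goldman table is the rotation by t+1 over 'ACGT'
theorem pvStep (s t : Int) (ht : t = 0 ∨ t = 1 ∨ t = 2) :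
    (pvGoldman.getD (pvNuc s) PySem.Dict.empty).getD t "" = pvNuc (s + pvDelta.getD t 0) := by
  have hs : s % 4 = 0 ∨ s % 4 = 1 ∨ s % 4 = 2 ∨ s % 4 = 3 := by omega
  have h1 := pvNuc_mod s
  have h2 := pvNuc_mod (s + pvDelta.getD t 0)
  have h3 : (s + pvDelta.getD t 0) % 4 = (s % 4 + pvDelta.getD t 0) % 4 := by omega
  rcases ht with rfl | rfl | rfl <;> rcases hs with hs | hs | hs | hs <;>
    (rw [h1, h2, h3, hs]; decide)

-- A's loop produces the letters of the running totals started at matching states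
theorem pvLoops (ts : List Int) (hts : ∀ t ∈ ts, t = 0 ∨ t = 1 ∨ t = 2) (s : Int) :
    (pvALoop ts (pvNuc s) []).2 = (pvBLoop ts s []).map pvNuc := by
  induction ts generalizing s with
  | nil => simp [pvALoop, pvBLoop]
  | cons t ts ih =>
    have ht : t = 0 ∨ t = 1 ∨ t = 2 := hts t (by simp)
    simp only [pvALoop, pvBLoop, pvStep s t ht]
    rw [pvALoop_acc, pvBLoop_acc]
    simp [ih (fun x hx => hts x (by simp [hx])) (s + pvDelta.getD t 0)]

-- ===== VERDICT (by name: the statement is the Claim_ definition above) =====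
theorem trits_to_dna_spec : Claim_equal_trits_to_dna := by
  intro trits start _ hpre
  unfold Spec_trits_to_dna trits_to_dna trits_to_dna_alt
  rcases eq_or_ne trits [] with rfl | hne
  · simp only [pvALoop, if_pos]
    rfl
  · rcases hpre with rfl | ⟨hstart, hts⟩
    · exact absurd rfl hne
    · rw [if_neg hne]
      have hkey : start = pvNuc (pvIdx.getD start 0) := by
        rcases hstart with rfl | rfl | rfl | rfl <;> decide
      nth_rewrite 1 [hkey]
      rw [pvLoops trits hts, pvOffsets_eq]
      have : (pvBLoop trits 0 []).map (fun o => pvNuc (pvIdx.getD start 0 + o))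
          = (pvBLoop trits (pvIdx.getD start 0) []).map pvNuc := by
        rw [show pvIdx.getD start 0 = pvIdx.getD start 0 + 0 by ring, pvBLoop_shift]
        simp [add_comm]
      simp only [this]
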